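-- pv_equiv track=rewrite | github.com/daniel-reich/turbo-robot | MiCMj8HvevYzGSb8J_5.py | fibo_word
-- ===== SOURCE A (Python) =====
-- def fibo_word(n):
--     x='b'
--     y='a'
--     if n<2:
--         return "invalid"
--     lst=[]
--     lst.append(x)
--     lst.append(y)
--     for i in range(n-2):
--         tmp=y+x
--         lst.append(tmp)
--         x=y
--         y=tmp
--     return ", ".join(lst)
-- ===== SOURCE B (Python) =====
-- def fibo_word(n):
--     if n < 2:
--         return "invalid"
--
--     def words(k):
--         # list of the first k Fibonacci words, k >= 2
--         if k == 2:
--             return ['b', 'a']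
--         ws = words(k - 1)
--         return ws + [ws[-1] + ws[-2]]
--
--     return ", ".join(words(n))
-- ===== Notes on version B (the rewrite author's own statement) =====
-- stated objective: alternative
-- what changed: Replaces A's iterative loop rolling two string variables and appending to a list with a recursive helper that builds the list of the first k Fibonacci words, reading the last two list elements instead of carried state.
import Mathlib
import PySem

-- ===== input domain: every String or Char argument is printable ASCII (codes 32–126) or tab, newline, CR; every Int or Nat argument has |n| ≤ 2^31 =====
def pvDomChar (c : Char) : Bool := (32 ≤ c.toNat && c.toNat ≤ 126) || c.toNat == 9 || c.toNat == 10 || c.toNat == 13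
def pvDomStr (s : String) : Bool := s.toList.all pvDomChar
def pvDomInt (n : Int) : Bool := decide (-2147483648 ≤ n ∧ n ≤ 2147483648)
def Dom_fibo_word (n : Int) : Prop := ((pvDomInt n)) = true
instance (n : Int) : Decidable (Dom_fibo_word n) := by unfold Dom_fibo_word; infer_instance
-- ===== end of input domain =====

-- B replaces A's iterative loop over two rolling string variables by a recursive
-- builder of the list of Fibonacci words that reads the list's last two elements
-- (objective: alternative decomposition).

-- ===== PORT A =====
-- transliteration of A: x='b'; y='a'; if n<2: 'invalid'; lst=[x,y];
-- for i in range(n-2): tmp=y+x; lst.append(tmp); x=y; y=tmp;  return ', '.join(lst)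
def fibo_word (n : Int) : String :=
  let x := "b"
  let y := "a"
  if n < 2 then "invalid"
  else
    let lst : List String := [] ++ [x] ++ [y]
    let st := (PySem.List.pyRange 0 (n - 2) 1).foldl
      (fun (s : String × String × List String) (_ : Int) =>
        let tmp := s.2.1 ++ s.1
        (s.2.1, tmp, s.2.2 ++ [tmp])) (x, y, lst)
    PySem.Str.join ", " st.2.2

-- ===== PORT B =====
-- transliteration of B's helper words(k) for k ≥ 2, as recursion on k-2;
-- ws[-1]/ws[-2] are PySem.List.pyGetD at -1/-2 (exact here: the list always has ≥ 2 elements)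
def fwWords : Nat → List String
  | 0 => ["b", "a"]
  | m + 1 =>
      let ws := fwWords m
      ws ++ [PySem.List.pyGetD ws (-1) "" ++ PySem.List.pyGetD ws (-2) ""]

def fibo_word_alt (n : Int) : String :=
  if n < 2 then "invalid"
  else PySem.Str.join ", " (fwWords (n.toNat - 2))

-- ===== PRECONDITION & SPEC =====
def Spec_fibo_word (n : Int) (out : String) : Prop := out = fibo_word_alt n
instance (n : Int) (out : String) : Decidable (Spec_fibo_word n out) := by unfold Spec_fibo_word; infer_instance

-- ===== CLAIM =====
def Claim_equal_fibo_word : Prop := ∀ (n : Int), Dom_fibo_word n → Spec_fibo_word n (fibo_word n)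

-- ===== LEMMAS AND PROOFS =====

-- proof-only helper: the k-th Fibonacci word
def fwWord : Nat → String
  | 0 => "b"
  | 1 => "a"
  | k + 2 => fwWord (k + 1) ++ fwWord k

-- a fold that ignores its elements depends only on the list's length
lemma foldl_drop_arg {α β : Type} (g : β → β) (l : List α) (init : β) :
    l.foldl (fun s _ => g s) init = (List.range l.length).foldl (fun s _ => g s) init := by
  induction l generalizing init with
  | nil => rfl
  | cons a l ih =>
      simp only [List.foldl_cons, List.length_cons, List.range_succ_eq_map, List.foldl_map]
      exact ih (g init)

-- invariant of A's loop: after m iterations the state is (w m, w (m+1), [w 0, …, w (m+1)])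
lemma fibo_loop_inv (m : Nat) :
    (List.range m).foldl
      (fun (s : String × String × List String) (_ : Nat) =>
        let tmp := s.2.1 ++ s.1
        (s.2.1, tmp, s.2.2 ++ [tmp])) ("b", "a", [] ++ ["b"] ++ ["a"])
    = (fwWord m, fwWord (m + 1), (List.range (m + 2)).map fwWord) := by
  induction m with
  | zero => simp [fwWord, List.range_succ]
  | succ m ih =>
      rw [List.range_succ, List.foldl_append, ih]
      simp [List.range_succ, fwWord]

-- B's recursive builder produces exactly the first m+2 Fibonacci words
lemma fwWords_eq_map (m : Nat) : fwWords m = (List.range (m + 2)).map fwWord := by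
  induction m with
  | zero => simp [fwWords, fwWord, List.range_succ]
  | succ m ih =>
      have hlen : ((List.range (m + 2)).map fwWord).length = m + 2 := by simp
      rw [fwWords, ih]
      have h1 : PySem.List.pyGetD ((List.range (m + 2)).map fwWord) (-1) ""
          = fwWord (m + 1) := by
        simp [PySem.List.pyGetD, PySem.List.pyGet?, PySem.List.pyIdx?]
      have h2 : PySem.List.pyGetD ((List.range (m + 2)).map fwWord) (-2) ""
          = fwWord m := by
        simp [PySem.List.pyGetD, PySem.List.pyGet?, PySem.List.pyIdx?]
      rw [h1, h2]
      simp [List.range_succ, fwWord]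

-- ===== VERDICT =====
theorem fibo_word_spec : Claim_equal_fibo_word := by
  intro n _
  unfold Spec_fibo_word fibo_word fibo_word_alt
  by_cases h : n < 2
  · simp [h]
  · simp only [h, if_false]
    rw [foldl_drop_arg (g := fun (s : String × String × List String) =>
        (s.2.1, s.2.1 ++ s.1, s.2.2 ++ [s.2.1 ++ s.1]))]
    have hl : (PySem.List.pyRange 0 (n - 2) 1).length = (n - 2).toNat := by
      simp [PySem.List.length_pyRange_one]
    rw [hl, fibo_loop_inv, fwWords_eq_map]
    have hn : (n - 2).toNat + 2 = n.toNat - 2 + 2 := by omega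
    rw [hn]
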